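-- pv_equiv track=rewrite | github.com/Kenzie-Academy-Brasil-Developers/q3-sprint1-estruturas-de-repeticao-larissakoliveira | main.py | remove_more_than_two_repetitions
-- ===== SOURCE A (Python) =====
-- def remove_more_than_two_repetitions(text):
--     output = ''
--     for index, item in enumerate(text):
--         try:
--             if item == text[index + 1] == text[index + 2]:
--                 continue
--             else:
--                 output += item
--         except:
--             output += item
--     return output
-- ===== SOURCE B (Python) =====
-- def remove_more_than_two_repetitions(text):
--     pieces = []
--     i = 0
--     n = len(text)
--     while i < n:
--         j = i
--         while j < n and text[j] == text[i]:
--             j += 1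
--         pieces.append(text[i] * min(2, j - i))
--         i = j
--     return ''.join(pieces)
-- ===== Notes on version B (the rewrite author's own statement) =====
-- stated objective: simpler
-- what changed: Replaces the per-index i/i+1/i+2 lookahead with except-based boundary handling by a run-length scan that walks each run of equal characters once and keeps at most two of them.
import Mathlib
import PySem

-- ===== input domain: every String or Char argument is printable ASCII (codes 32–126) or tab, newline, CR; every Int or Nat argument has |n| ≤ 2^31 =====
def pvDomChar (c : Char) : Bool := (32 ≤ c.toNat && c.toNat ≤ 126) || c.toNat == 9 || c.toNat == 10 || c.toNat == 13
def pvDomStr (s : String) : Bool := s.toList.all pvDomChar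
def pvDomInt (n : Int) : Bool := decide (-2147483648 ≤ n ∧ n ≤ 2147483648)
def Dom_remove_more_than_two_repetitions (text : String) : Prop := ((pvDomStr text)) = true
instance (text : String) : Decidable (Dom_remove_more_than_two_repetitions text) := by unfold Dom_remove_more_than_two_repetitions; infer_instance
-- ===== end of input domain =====

-- B replaces A's per-index i/i+1/i+2 lookahead (with except-based boundary handling)
-- by a run-length scan keeping at most two characters of each run; objective: simpler.

-- ===== PORT A =====
-- literal transliteration: for index, item in enumerate(text): try chained comparison
-- item == text[index+1] == text[index+2] (text[index+2] only evaluated when the first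
-- comparison is true); IndexError (pyGet? = none) takes the except branch (append item).
def pvAStep (cs : List Char) (out : List Char) (p : Int × Char) : List Char :=
  match PySem.List.pyGet? cs (p.1 + 1) with
  | none => out ++ [p.2]
  | some a =>
    if p.2 == a then
      match PySem.List.pyGet? cs (p.1 + 2) with
      | none => out ++ [p.2]
      | some b => if a == b then out else out ++ [p.2]
    else out ++ [p.2]

def remove_more_than_two_repetitions (text : String) : String :=
  String.mk ((PySem.List.enumerate text.toList 0).foldl (pvAStep text.toList) [])

-- ===== PORT B =====
-- Source B: walk the string run by run (inner while extends j over the current run of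
-- text[i]), emit text[i] * min(2, run length), continue at the end of the run.
def pvRuns (l : List Char) : List Char :=
  match l with
  | [] => []
  | x :: xs =>
    let run := xs.takeWhile (· == x)
    let rest := xs.dropWhile (· == x)
    List.replicate (min 2 (run.length + 1)) x ++ pvRuns rest
termination_by l.length
decreasing_by
  simp only [List.length_cons]
  exact Nat.lt_succ_of_le (List.length_dropWhile_le _ _)

def remove_more_than_two_repetitions_alt (text : String) : String :=
  String.mk (pvRuns text.toList)

-- ===== PRECONDITION & SPEC =====
def Spec_remove_more_than_two_repetitions (text : String) (out : String) : Prop := out = remove_more_than_two_repetitions_alt text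
instance (text : String) (out : String) : Decidable (Spec_remove_more_than_two_repetitions text out) := by unfold Spec_remove_more_than_two_repetitions; infer_instance

-- ===== CLAIM (what is proved, stated in full; the proofs are below) =====
def Claim_equal_remove_more_than_two_repetitions : Prop := ∀ (text : String), Dom_remove_more_than_two_repetitions text → Spec_remove_more_than_two_repetitions text (remove_more_than_two_repetitions text)

-- ===== LEMMAS AND PROOFS =====

-- A's loop, rephrased as a lookahead recursion on the suffix being scanned.
def pvASuffix : List Char → List Char
  | [] => []
  | x :: xs =>
    match xs with
    | y :: z :: _ => if x == y && y == z then pvASuffix xs else x :: pvASuffix xs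
    | _ => x :: pvASuffix xs

-- what one iteration of A's loop appends, as a function of the lookahead
def pvKeep (x : Char) (xs : List Char) : List Char :=
  match xs with
  | y :: z :: _ => if x == y && y == z then [] else [x]
  | _ => [x]

lemma pvASuffix_cons (x : Char) (xs : List Char) :
    pvASuffix (x :: xs) = pvKeep x xs ++ pvASuffix xs := by
  match xs with
  | [] => simp [pvASuffix, pvKeep]
  | [y] => simp [pvASuffix, pvKeep]
  | y :: z :: t =>
    by_cases h : x == y && y == z
    · simp [pvASuffix, pvKeep, h]
    · simp [pvASuffix, pvKeep, h]

lemma pvRuns_cons (x : Char) (xs : List Char) :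
    pvRuns (x :: xs) = List.replicate (min 2 ((xs.takeWhile (· == x)).length + 1)) x
      ++ pvRuns (xs.dropWhile (· == x)) := by
  rw [pvRuns]

-- A's fold over `enumerate cs i` with lookups in the full list cs equals the
-- lookahead recursion over the suffix cs.drop i, for any accumulator.
lemma pvA_fold_suffix (cs : List Char) : ∀ (suf : List Char) (i : Nat) (out : List Char),
    cs.drop i = suf →
    (PySem.List.enumerate suf (i : Int)).foldl (pvAStep cs) out = out ++ pvASuffix suf := by
  intro suf
  induction suf with
  | nil => intro i out _; simp [PySem.List.enumerate_nil, pvASuffix]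
  | cons x xs ih =>
    intro i out hdrop
    have h1 : cs[i+1]? = xs[0]? := by
      rw [← List.getElem?_drop, hdrop]; rfl
    have h2 : cs[i+2]? = xs[1]? := by
      rw [← List.getElem?_drop, hdrop]; rfl
    have hdrop' : cs.drop (i + 1) = xs := by
      rw [← List.tail_drop, hdrop]; rfl
    have hg1 : PySem.List.pyGet? cs ((i : Int) + 1) = xs[0]? := by
      have hc : ((i : Int) + 1) = ((i + 1 : Nat) : Int) := by push_cast; ring
      rw [hc, PySem.List.pyGet?_natCast, h1]
    have hg2 : PySem.List.pyGet? cs ((i : Int) + 2) = xs[1]? := by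
      have hc : ((i : Int) + 2) = ((i + 2 : Nat) : Int) := by push_cast; ring
      rw [hc, PySem.List.pyGet?_natCast, h2]
    have step : pvAStep cs out ((i : Int), x) = out ++ pvKeep x xs := by
      simp only [pvAStep, hg1, hg2]
      match xs with
      | [] => simp [pvKeep]
      | [y] =>
        simp only [List.getElem?_cons_zero, pvKeep]
        by_cases h : x == y <;> simp [h]
      | y :: z :: t =>
        simp only [List.getElem?_cons_zero, List.getElem?_cons_succ, pvKeep]
        by_cases h : x == y
        · by_cases h' : y == z
          · simp [h, h']
          · simp [h, h']
        · simp [h]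
    have hcast : ((i : Int) + 1) = ((i + 1 : Nat) : Int) := by push_cast; ring
    rw [PySem.List.enumerate_cons, List.foldl_cons, step, hcast,
        ih (i + 1) (out ++ pvKeep x xs) hdrop', pvASuffix_cons, List.append_assoc]

-- a run of n copies of x, followed by text not starting with x, keeps min 2 n copies.
lemma pvASuffix_run (x : Char) : ∀ (n : Nat) (rest : List Char),
    (∀ r, rest.head? = some r → (r == x) = false) →
    pvASuffix (List.replicate n x ++ rest) = List.replicate (min 2 n) x ++ pvASuffix rest := by
  intro n
  induction n with
  | zero => intro rest _; simp
  | succ m ihm =>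
    intro rest hrest
    rcases m with _ | m
    · -- single x then rest (not starting with x)
      rcases rest with _ | ⟨r, t⟩
      · simp [pvASuffix]
      · have hr : (x == r) = false := by
          cases hxr : x == r with
          | false => rfl
          | true =>
            have hx := eq_of_beq hxr
            subst hx
            simpa using hrest x rfl
        rcases t with _ | ⟨s, t'⟩
        · simp [pvASuffix]
        · simp [pvASuffix, hr]
    rcases m with _ | k
    · -- x :: x :: rest
      rcases rest with _ | ⟨r, t⟩
      · simp [pvASuffix]
      · have hr : (x == r) = false := by
          cases hxr : x == r with
          | false => rfl
          | true =>
            have hx := eq_of_beq hxr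
            subst hx
            simpa using hrest x rfl
        have h1 := ihm (r :: t) hrest
        simp only [List.replicate_succ, List.replicate_zero, List.cons_append,
          List.nil_append] at h1 ⊢
        rw [pvASuffix_cons x (x :: r :: t), h1]
        simp [pvKeep, hr]
    · -- at least three leading x's: the first one is dropped
      have hhead : pvASuffix (List.replicate (k + 3) x ++ rest)
          = pvASuffix (List.replicate (k + 2) x ++ rest) := by
        simp [List.replicate_succ, pvASuffix]
      have hmin : min 2 (k + 2) = min 2 (k + 3) := by omega
      rw [show k + 1 + 1 + 1 = k + 3 from rfl, hhead,
          ihm rest hrest, hmin]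

lemma pvASuffix_eq_pvRuns : ∀ (l : List Char), pvASuffix l = pvRuns l := by
  intro l
  induction hn : l.length using Nat.strong_induction_on generalizing l with
  | _ n ih =>
    match l with
    | [] => simp [pvASuffix, pvRuns]
    | x :: xs =>
      have hsplit : xs = xs.takeWhile (· == x) ++ xs.dropWhile (· == x) :=
        (List.takeWhile_append_dropWhile ..).symm
      have hrep : xs.takeWhile (· == x) = List.replicate (xs.takeWhile (· == x)).length x := by
        apply List.eq_replicate_of_mem
        intro c hc
        have hcp := List.mem_takeWhile_imp (p := fun y => y == x) hc
        exact eq_of_beq hcp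
      have hrest : ∀ r, (xs.dropWhile (· == x)).head? = some r → (r == x) = false := by
        intro r hr
        have h := List.head?_dropWhile_not (· == x) xs
        rw [hr] at h
        exact h
      have hcons : x :: xs = List.replicate ((xs.takeWhile (· == x)).length + 1) x
          ++ xs.dropWhile (· == x) := by
        conv_lhs => rw [hsplit]
        rw [List.replicate_succ, hrep]
        simp
      have hlen : (xs.dropWhile (· == x)).length < n := by
        subst hn
        simp only [List.length_cons]
        exact Nat.lt_succ_of_le (List.length_dropWhile_le _ _)
      have ihrest := ih _ hlen (xs.dropWhile (· == x)) rfl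
      conv_lhs => rw [hcons]
      rw [pvASuffix_run x _ _ hrest, ihrest, pvRuns_cons x xs]

-- ===== VERDICT (by name: the statement is the Claim_ definition above) =====
theorem remove_more_than_two_repetitions_spec : Claim_equal_remove_more_than_two_repetitions := by
  intro text _
  unfold Spec_remove_more_than_two_repetitions remove_more_than_two_repetitions remove_more_than_two_repetitions_alt
  rw [show ((0 : Int)) = ((0 : Nat) : Int) from rfl,
      pvA_fold_suffix text.toList text.toList 0 [] rfl,
      pvASuffix_eq_pvRuns]
  rfl
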